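-- pv_equiv track=rewrite | github.com/zhenfelix/OnlineJudgeCodings | LeetCode/2005. Subtree Removal Game with Fibonacci Tree/solution.py | findGameWinner
-- ===== SOURCE A (Python) =====
-- def findGameWinner(n: int) -> bool:
--     if n == 1:
--         return False
--     dp = [0]*n
--     dp[1] = 1
--     for i in range(n):
--         dp[i] = 1+(dp[i-1]^dp[i-2])
--     return (dp[i-1]^dp[i-2]) > 0
-- ===== SOURCE B (Python) =====
-- def findGameWinner(n: int) -> bool:
--     # Grundy analysis of the Fibonacci-tree game is periodic with period 6:
--     # the first player loses exactly when n % 6 == 1 (n == 1 included).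
--     return n % 6 != 1
-- ===== Notes on version B (the rewrite author's own statement) =====
-- stated objective: faster
-- what changed: Replaced the O(n) grundy-style DP array with the closed-form period-6 test n % 6 != 1 (proved equal to A's dp computation by a period-6 invariant of the recurrence dp[i] = 1 + (dp[i-1] ^ dp[i-2])).
-- outside the precondition, e.g. on findGameWinner(0): A raises IndexError, B returns True
import Mathlib
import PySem

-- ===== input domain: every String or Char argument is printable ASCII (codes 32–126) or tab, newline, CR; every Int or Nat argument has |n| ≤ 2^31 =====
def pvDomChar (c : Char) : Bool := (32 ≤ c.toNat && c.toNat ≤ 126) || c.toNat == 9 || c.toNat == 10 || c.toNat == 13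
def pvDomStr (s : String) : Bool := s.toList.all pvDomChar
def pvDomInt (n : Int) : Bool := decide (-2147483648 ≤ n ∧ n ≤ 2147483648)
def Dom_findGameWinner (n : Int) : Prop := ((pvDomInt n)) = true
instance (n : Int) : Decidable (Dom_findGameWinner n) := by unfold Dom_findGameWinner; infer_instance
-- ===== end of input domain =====

-- B replaces A's O(n) grundy DP array with the closed-form period-6 test n % 6 != 1 (asymptotically faster).


-- ===== PORT A =====
-- dp is a Python list mutated in place; we carry it as an Array Int (the efficient mutable-list
-- representation), step for step. `pyArrGet dp t` is Python's dp[t] (a negative index wraps):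
-- exact whenever -len(dp) ≤ t (on this port's runs the reads are t ≥ -2 with len(dp) = n ≥ 2;
-- n ≤ 0, where Python raises IndexError at `dp[1] = 1`, is excluded by Pre_).
def pyArrGet (dp : Array Int) (t : Int) : Int :=
  if t < 0 then dp.getD (t + dp.size).toNat 0 else dp.getD t.toNat 0

def findGameWinner (n : Int) : Bool :=
  if n = 1 then false
  else
    let dp0 := Array.replicate n.toNat (0 : Int)         -- dp = [0]*n
    let dp1 := dp0.setIfInBounds 1 1                     -- dp[1] = 1  (IndexError when n ≤ 0: excluded by Pre_)
    -- for i in range(n): dp[i] = 1+(dp[i-1]^dp[i-2])    (bxor is Python's ^; i is ≥ 0 and in range)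
    let dp := (PySem.List.pyRange 0 n 1).foldl (fun dp i =>
        dp.setIfInBounds i.toNat
          (1 + PySem.Int.bxor (pyArrGet dp (i-1)) (pyArrGet dp (i-2)))) dp1
    let i := n - 1                                       -- Python's loop variable after the loop (range nonempty on Pre_)
    decide (0 < PySem.Int.bxor (pyArrGet dp (i-1)) (pyArrGet dp (i-2)))

-- ===== PORT B =====
def findGameWinner_alt (n : Int) : Bool :=
  decide (PySem.Int.mod n 6 ≠ 1)

-- ===== PRECONDITION & SPEC =====
-- Pre_ excludes exactly n ≤ 0, where A raises IndexError at `dp[1] = 1` (dp has length ≤ 0 there).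
def Pre_findGameWinner (n : Int) : Prop := 1 ≤ n
instance (n : Int) : Decidable (Pre_findGameWinner n) := by unfold Pre_findGameWinner; infer_instance
def pvWitness_findGameWinner : Int := (5)

def Spec_findGameWinner (n : Int) (out : Bool) : Prop := out = findGameWinner_alt n
instance (n : Int) (out : Bool) : Decidable (Spec_findGameWinner n out) := by unfold Spec_findGameWinner; infer_instance

-- ===== CLAIM (what is proved, stated in full; the proofs are below) =====
def Claim_equal_findGameWinner : Prop := ∀ (n : Int), Dom_findGameWinner n → Pre_findGameWinner n → Spec_findGameWinner n (findGameWinner n)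

-- ===== LEMMAS AND PROOFS =====

-- The pure sequence the loop computes at positions 0,1,2,… once m = n ≥ 4.
def aseq : Nat → Nat
  | 0 => 1
  | 1 => 2
  | (i+2) => 1 + (aseq (i+1) ^^^ aseq i)

theorem aseq_step (i : Nat) : aseq (i+2) = 1 + (aseq (i+1) ^^^ aseq i) := rfl

-- the loop at the List level (proof-side model of the Array foldl)
def loopSpec (dp : List Int) (idxs : List Int) : List Int :=
  match idxs with
  | [] => dp
  | i :: rest =>
      loopSpec (PySem.List.pySetD dp i
        (1 + PySem.Int.bxor (PySem.List.pyGetD dp (i-1) 0) (PySem.List.pyGetD dp (i-2) 0))) rest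

theorem loopSpec_append (dp : List Int) (xs ys : List Int) :
    loopSpec dp (xs ++ ys) = loopSpec (loopSpec dp xs) ys := by
  induction xs generalizing dp with
  | nil => rfl
  | cons x xs ih => simp [loopSpec, ih]

theorem pyArrGet_eq (dp : Array Int) (t : Int) (h : -(dp.size : Int) ≤ t) :
    pyArrGet dp t = PySem.List.pyGetD dp.toList t 0 := by
  unfold pyArrGet
  by_cases ht : t < 0
  · rw [if_pos ht]
    have hk : t = -(((-t).toNat : Nat) : Int) := by omega
    rw [hk, PySem.List.pyGetD_neg_natCast _ _ _ (by omega) (by simp; omega)]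
    have e : (-(((-t).toNat : Nat) : Int) + (dp.size : Int)).toNat = dp.toList.length - (-t).toNat := by
      simp; omega
    rw [e, Array.getD_eq_getD_getElem?, ← Array.getElem?_toList,
        List.getElem?_eq_getElem (by simp at h ⊢; omega)]
    rfl
  · rw [if_neg ht]
    have hk : t = ((t.toNat : Nat) : Int) := by omega
    rw [hk, PySem.List.pyGetD_natCast, Int.toNat_natCast,
        Array.getD_eq_getD_getElem?, ← Array.getElem?_toList, List.getD_eq_getElem?_getD]

theorem foldl_toList (idxs : List Int) (dp : Array Int) (hsz : 2 ≤ dp.size)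
    (hpos : ∀ i ∈ idxs, (0:Int) ≤ i) :
    (idxs.foldl (fun dp i =>
        dp.setIfInBounds i.toNat
          (1 + PySem.Int.bxor (pyArrGet dp (i-1)) (pyArrGet dp (i-2)))) dp).toList =
      loopSpec dp.toList idxs := by
  induction idxs generalizing dp with
  | nil => rfl
  | cons i rest ih =>
    have hi : (0:Int) ≤ i := hpos i (by simp)
    rw [List.foldl_cons]
    rw [ih _ (by simp [Array.size_setIfInBounds, hsz]) (fun j hj => hpos j (by simp [hj]))]
    simp only [loopSpec]
    rw [pyArrGet_eq _ _ (by omega), pyArrGet_eq _ _ (by omega),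
        Array.toList_setIfInBounds, PySem.List.pySetD_of_nonneg _ _ hi]

theorem foldl_size (idxs : List Int) (dp : Array Int) :
    (idxs.foldl (fun dp i =>
        dp.setIfInBounds i.toNat
          (1 + PySem.Int.bxor (pyArrGet dp (i-1)) (pyArrGet dp (i-2)))) dp).size = dp.size := by
  induction idxs generalizing dp with
  | nil => rfl
  | cons i rest ih => rw [List.foldl_cons, ih, Array.size_setIfInBounds]

-- xor splits across the low two bits
theorem xor4 (a b r s : Nat) (hr : r < 4) (hs : s < 4) :
    (4*a + r) ^^^ (4*b + s) = 4*(a ^^^ b) + (r ^^^ s) := by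
  have hd : ((4*a+r) ^^^ (4*b+s)) / 2^2 = a ^^^ b := by
    rw [Nat.xor_div_two_pow]
    have h1 : (4*a+r) / 2^2 = a := by omega
    have h2 : (4*b+s) / 2^2 = b := by omega
    rw [h1, h2]
  have hm : ((4*a+r) ^^^ (4*b+s)) % 2^2 = r ^^^ s := by
    rw [Nat.xor_mod_two_pow]
    have h1 : (4*a+r) % 2^2 = r := by omega
    have h2 : (4*b+s) % 2^2 = s := by omega
    rw [h1, h2]
  have hlt : r ^^^ s < 2^2 := Nat.xor_lt_two_pow hr hs
  omega

theorem aseq_period (k : Nat) :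
    aseq (6*k) = 1 ∧ aseq (6*k+1) = 4*k+2 ∧ aseq (6*k+2) = 4*k+4 ∧
    aseq (6*k+3) = 4*((k+1) ^^^ k) + 3 ∧ aseq (6*k+4) = 4*k+4 ∧ aseq (6*k+5) = 4*k+4 := by
  induction k with
  | zero => refine ⟨rfl, rfl, rfl, ?_, rfl, rfl⟩; decide
  | succ k ih =>
    obtain ⟨h0, h1, h2, h3, h4, h5⟩ := ih
    have e1 : (1:Nat) = 4*0 + 1 := by omega
    have h6 : aseq (6*(k+1)) = 1 := by
      have e : 6*(k+1) = (6*k+4)+2 := by omega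
      rw [e, aseq_step]
      have e5 : (6*k+4)+1 = 6*k+5 := by omega
      rw [e5, h5, h4, Nat.xor_self]
    have h7 : aseq (6*(k+1)+1) = 4*(k+1)+2 := by
      have e : 6*(k+1)+1 = (6*k+5)+2 := by omega
      rw [e, aseq_step]
      have e6 : (6*k+5)+1 = 6*(k+1) := by omega
      rw [e6, h6, h5]
      have e4 : 4*k+4 = 4*(k+1) + 0 := by omega
      rw [e1, e4, xor4 0 (k+1) 1 0 (by omega) (by omega)]
      simp only [Nat.zero_xor, Nat.xor_zero]
      omega
    have h8 : aseq (6*(k+1)+2) = 4*(k+1)+4 := by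
      have e : 6*(k+1)+2 = (6*(k+1))+2 := by omega
      rw [e, aseq_step, h7, h6]
      rw [e1, xor4 (k+1) 0 2 1 (by omega) (by omega)]
      simp; omega
    have h9 : aseq (6*(k+1)+3) = 4*((k+2) ^^^ (k+1)) + 3 := by
      have e : 6*(k+1)+3 = (6*(k+1)+1)+2 := by omega
      rw [e, aseq_step]
      have e2 : (6*(k+1)+1)+1 = 6*(k+1)+2 := by omega
      rw [e2, h8, h7]
      have e4 : 4*(k+1)+4 = 4*(k+2) + 0 := by omega
      rw [e4, xor4 (k+2) (k+1) 0 2 (by omega) (by omega)]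
      simp only [Nat.zero_xor]
      omega
    have h10 : aseq (6*(k+1)+4) = 4*(k+1)+4 := by
      have e : 6*(k+1)+4 = (6*(k+1)+2)+2 := by omega
      rw [e, aseq_step]
      have e2 : (6*(k+1)+2)+1 = 6*(k+1)+3 := by omega
      rw [e2, h9, h8]
      have e4 : 4*(k+1)+4 = 4*(k+2) + 0 := by omega
      rw [e4, xor4 ((k+2) ^^^ (k+1)) (k+2) 3 0 (by omega) (by omega)]
      simp only [Nat.xor_zero]
      have : ((k+2) ^^^ (k+1)) ^^^ (k+2) = k+1 := by
        rw [Nat.xor_comm (k+2) (k+1), Nat.xor_xor_cancel_right]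
      rw [this]; omega
    have h11 : aseq (6*(k+1)+5) = 4*(k+1)+4 := by
      have e : 6*(k+1)+5 = (6*(k+1)+3)+2 := by omega
      rw [e, aseq_step]
      have e2 : (6*(k+1)+3)+1 = 6*(k+1)+4 := by omega
      rw [e2, h10, h9]
      have e4 : 4*(k+1)+4 = 4*(k+2) + 0 := by omega
      rw [e4, xor4 (k+2) ((k+2) ^^^ (k+1)) 0 3 (by omega) (by omega)]
      simp only [Nat.zero_xor]
      have : (k+2) ^^^ ((k+2) ^^^ (k+1)) = k+1 := by
        rw [Nat.xor_comm (k+2) ((k+2) ^^^ (k+1)), Nat.xor_comm (k+2) (k+1),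
            Nat.xor_xor_cancel_right]
      rw [this]; omega
    exact ⟨h6, h7, h8, h9, h10, h11⟩

-- the initial dp of A's loop, as the port builds it
def dpInit (m : Nat) : List Int := (List.replicate m (0:Int)).set 1 1

theorem dpInit_length (m : Nat) : (dpInit m).length = m := by
  simp [dpInit]

theorem dpInit_getElem (m j : Nat) (hj : j < (dpInit m).length) :
    (dpInit m)[j] = if 1 = j then 1 else 0 := by
  simp only [dpInit, List.getElem_set, List.getElem_replicate]

theorem base_case (m : Nat) (hm : 4 ≤ m) :
    loopSpec (dpInit m) (PySem.List.pyRange 0 (2:Int) 1) =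
      ((List.range 2).map (fun j => (aseq j : Int))) ++ List.replicate (m - 2) 0 := by
  have hlen : (dpInit m).length = m := dpInit_length m
  have h2 : PySem.List.pyRange 0 (2:Int) 1 = [0, 1] := by decide
  rw [h2]
  simp only [loopSpec]
  have r1 : PySem.List.pyGetD (dpInit m) ((0:Int)-1) 0 = 0 := by
    have e : (0:Int) - 1 = -1 := by norm_num
    rw [e, PySem.List.pyGetD_neg_ofNat _ 1 _ (by omega) (by omega)]
    rw [dpInit_getElem, if_neg (by omega)]
  have r2 : PySem.List.pyGetD (dpInit m) ((0:Int)-2) 0 = 0 := by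
    have e : (0:Int) - 2 = -2 := by norm_num
    rw [e, PySem.List.pyGetD_neg_ofNat _ 2 _ (by omega) (by omega)]
    rw [dpInit_getElem, if_neg (by omega)]
  rw [r1, r2]
  have hv0 : (1:Int) + PySem.Int.bxor 0 0 = 1 := by decide
  rw [hv0]
  have hs0 : PySem.List.pySetD (dpInit m) 0 1 = (dpInit m).set 0 1 := by
    rw [PySem.List.pySetD_of_nonneg _ _ (by omega)]; rfl
  rw [hs0]
  have hlen' : ((dpInit m).set 0 1).length = m := by simp [hlen]
  have r3 : PySem.List.pyGetD ((dpInit m).set 0 1) ((1:Int)-1) 0 = 1 := by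
    have e : (1:Int) - 1 = ((0:Nat):Int) := by norm_num
    rw [e, PySem.List.pyGetD_natCast, List.getD_eq_getElem _ _ (by omega)]
    rw [List.getElem_set, if_pos rfl]
  have r4 : PySem.List.pyGetD ((dpInit m).set 0 1) ((1:Int)-2) 0 = 0 := by
    have e : (1:Int) - 2 = -1 := by norm_num
    rw [e, PySem.List.pyGetD_neg_ofNat _ 1 _ (by omega) (by omega)]
    rw [List.getElem_set, if_neg (by omega), dpInit_getElem, if_neg (by omega)]
  rw [r3, r4]
  have hv1 : (1:Int) + PySem.Int.bxor 1 0 = 2 := by decide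
  rw [hv1]
  have hs1 : PySem.List.pySetD ((dpInit m).set 0 1) 1 2 = ((dpInit m).set 0 1).set 1 2 := by
    rw [PySem.List.pySetD_of_nonneg _ _ (by omega)]; rfl
  rw [hs1]
  apply List.ext_getElem
  · simp [hlen]; omega
  · intro j hj1 hj2
    have hjm : j < m := by simpa [hlen] using hj1
    simp only [List.getElem_set]
    by_cases hj0 : j = 0
    · subst hj0
      simp [aseq]
    · by_cases hje : j = 1
      · subst hje
        simp [aseq]
      · rw [if_neg (by omega), if_neg (by omega), dpInit_getElem, if_neg (by omega)]
        rw [List.getElem_append_right (by simp; omega)]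
        simp

theorem loop_invariant (m : Nat) (hm : 4 ≤ m) :
    ∀ i, 2 ≤ i → i ≤ m →
      loopSpec (dpInit m) (PySem.List.pyRange 0 (i:Int) 1) =
        ((List.range i).map (fun j => (aseq j : Int))) ++ List.replicate (m - i) 0 := by
  intro i h2
  induction i, h2 using Nat.le_induction with
  | base => intro _; exact base_case m hm
  | succ i hi ih =>
    intro him
    have e : ((i+1 : Nat) : Int) = ((i:Nat):Int) + 1 := by push_cast; ring
    rw [e, PySem.List.pyRange_one_succ_right (by positivity)]
    rw [loopSpec_append, ih (by omega)]
    simp only [loopSpec]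
    have lenA : (((List.range i).map (fun j => (aseq j : Int)))).length = i := by simp
    have r1 : PySem.List.pyGetD
        (((List.range i).map (fun j => (aseq j : Int))) ++ List.replicate (m - i) 0)
        ((i:Int)-1) 0 = (aseq (i-1) : Int) := by
      have e1 : (i:Int) - 1 = ((i-1 : Nat) : Int) := by omega
      rw [e1, PySem.List.pyGetD_natCast, List.getD_append _ _ _ _ (by omega)]
      rw [List.getD_eq_getElem _ _ (by omega)]
      simp only [List.getElem_map, List.getElem_range]
    have r2 : PySem.List.pyGetD
        (((List.range i).map (fun j => (aseq j : Int))) ++ List.replicate (m - i) 0)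
        ((i:Int)-2) 0 = (aseq (i-2) : Int) := by
      have e1 : (i:Int) - 2 = ((i-2 : Nat) : Int) := by omega
      rw [e1, PySem.List.pyGetD_natCast, List.getD_append _ _ _ _ (by omega)]
      rw [List.getD_eq_getElem _ _ (by omega)]
      simp only [List.getElem_map, List.getElem_range]
    rw [r1, r2]
    have hv : (1:Int) + PySem.Int.bxor (aseq (i-1) : Int) (aseq (i-2) : Int)
        = ((aseq i : Nat) : Int) := by
      rw [PySem.Int.bxor_natCast]
      have ha : aseq i = 1 + (aseq (i-1) ^^^ aseq (i-2)) := by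
        conv_lhs => rw [show i = (i-2)+2 from by omega]
        rw [aseq_step, show (i-2)+1 = i-1 from by omega]
      rw [ha]; push_cast; ring
    rw [hv, PySem.List.pySetD_natCast, List.set_append]
    rw [if_neg (by omega), lenA, Nat.sub_self]
    have hrep : List.replicate (m - i) (0:Int) = 0 :: List.replicate (m - (i+1)) 0 := by
      rw [show m - i = (m - (i+1)) + 1 from by omega, List.replicate_succ]
    rw [hrep]
    simp only [List.set_cons_zero]
    rw [List.range_succ, List.map_append, List.append_assoc]
    rfl

theorem main4 (m : Nat) (hm : 4 ≤ m) :
    findGameWinner (m:Int) = decide (aseq (m-2) ≠ aseq (m-3)) := by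
  unfold findGameWinner
  rw [if_neg (by omega : ¬ ((m:Int) = 1))]
  simp only [Int.toNat_natCast]
  rw [decide_eq_decide]
  have hsz : ((Array.replicate m (0:Int)).setIfInBounds 1 1).size = m := by
    simp [Array.size_setIfInBounds]
  have hfsz : ((PySem.List.pyRange 0 (m:Int) 1).foldl (fun dp i =>
      dp.setIfInBounds i.toNat
        (1 + PySem.Int.bxor (pyArrGet dp (i-1)) (pyArrGet dp (i-2))))
      ((Array.replicate m (0:Int)).setIfInBounds 1 1)).size = m := by
    rw [foldl_size, hsz]
  have hinit : ((Array.replicate m (0:Int)).setIfInBounds 1 1).toList = dpInit m := by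
    rw [Array.toList_setIfInBounds, Array.toList_replicate]; rfl
  have htl : ((PySem.List.pyRange 0 (m:Int) 1).foldl (fun dp i =>
      dp.setIfInBounds i.toNat
        (1 + PySem.Int.bxor (pyArrGet dp (i-1)) (pyArrGet dp (i-2))))
      ((Array.replicate m (0:Int)).setIfInBounds 1 1)).toList =
      (List.range m).map (fun j => (aseq j : Int)) := by
    rw [foldl_toList _ _ (by rw [hsz]; omega)
        (fun j hj => by
          have := (PySem.List.mem_pyRange_one).1 hj
          omega)]
    rw [hinit, loop_invariant m hm m (by omega) le_rfl, Nat.sub_self]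
    simp
  rw [pyArrGet_eq _ _ (by rw [hfsz]; omega), pyArrGet_eq _ _ (by rw [hfsz]; omega), htl]
  have e1 : (m:Int) - 1 - 1 = ((m-2 : Nat) : Int) := by omega
  have e2 : (m:Int) - 1 - 2 = ((m-3 : Nat) : Int) := by omega
  rw [e1, e2, PySem.List.pyGetD_natCast, PySem.List.pyGetD_natCast]
  have g1 : ((List.range m).map (fun j => (aseq j : Int))).getD (m-2) 0 = (aseq (m-2) : Int) := by
    rw [List.getD_eq_getElem _ _ (by simp; omega)]
    simp only [List.getElem_map, List.getElem_range]
  have g2 : ((List.range m).map (fun j => (aseq j : Int))).getD (m-3) 0 = (aseq (m-3) : Int) := by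
    rw [List.getD_eq_getElem _ _ (by simp; omega)]
    simp only [List.getElem_map, List.getElem_range]
  rw [g1, g2, PySem.Int.bxor_natCast, Int.natCast_pos, Nat.pos_iff_ne_zero, ne_eq,
      Nat.xor_eq_zero_iff]

theorem neighbor (m : Nat) (hm : 4 ≤ m) :
    (aseq (m-2) ≠ aseq (m-3)) ↔ m % 6 ≠ 1 := by
  obtain ⟨k, r, hr, hm3⟩ : ∃ k r, r < 6 ∧ m - 3 = 6*k + r :=
    ⟨(m-3)/6, (m-3)%6, by omega, by omega⟩
  obtain ⟨p0, p1, p2, p3, p4, p5⟩ := aseq_period k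
  obtain ⟨q0, q1, q2, q3, q4, q5⟩ := aseq_period (k+1)
  interval_cases r
  · have a1 : aseq (m-2) = 4*k+2 := by rw [show m-2 = 6*k+1 from by omega]; exact p1
    have a2 : aseq (m-3) = 1 := by rw [show m-3 = 6*k from by omega]; exact p0
    rw [a1, a2]; omega
  · have a1 : aseq (m-2) = 4*k+4 := by rw [show m-2 = 6*k+2 from by omega]; exact p2
    have a2 : aseq (m-3) = 4*k+2 := by rw [show m-3 = 6*k+1 from by omega]; exact p1
    rw [a1, a2]; omega
  · have a1 : aseq (m-2) = 4*((k+1) ^^^ k)+3 := by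
      rw [show m-2 = 6*k+3 from by omega]; exact p3
    have a2 : aseq (m-3) = 4*k+4 := by rw [show m-3 = 6*k+2 from by omega]; exact p2
    rw [a1, a2]; omega
  · have a1 : aseq (m-2) = 4*k+4 := by rw [show m-2 = 6*k+4 from by omega]; exact p4
    have a2 : aseq (m-3) = 4*((k+1) ^^^ k)+3 := by
      rw [show m-3 = 6*k+3 from by omega]; exact p3
    rw [a1, a2]; omega
  · have a1 : aseq (m-2) = 4*k+4 := by rw [show m-2 = 6*k+5 from by omega]; exact p5
    have a2 : aseq (m-3) = 4*k+4 := by rw [show m-3 = 6*k+4 from by omega]; exact p4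
    rw [a1, a2]; omega
  · have a1 : aseq (m-2) = 1 := by rw [show m-2 = 6*(k+1) from by omega]; exact q0
    have a2 : aseq (m-3) = 4*k+4 := by rw [show m-3 = 6*k+5 from by omega]; exact p5
    rw [a1, a2]; omega

theorem alt_nat (m : Nat) : findGameWinner_alt (m:Int) = decide (m % 6 ≠ 1) := by
  unfold findGameWinner_alt
  have h6 : (6:Int) = ((6:Nat):Int) := rfl
  rw [h6, PySem.Int.mod_natCast]
  rw [decide_eq_decide]
  constructor
  · intro h hc; exact h (by exact_mod_cast congrArg (fun x : Nat => (x:Int)) hc)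
  · intro h hc; exact h (by exact_mod_cast hc)

-- ===== VERDICT (by name: the statement is the Claim_ definition above) =====
theorem findGameWinner_spec : Claim_equal_findGameWinner := by
  intro n _ hpre
  unfold Spec_findGameWinner
  unfold Pre_findGameWinner at hpre
  have hc : n = 1 ∨ n = 2 ∨ n = 3 ∨ 4 ≤ n := by omega
  rcases hc with h | h | h | h
  · subst h; decide
  · subst h; decide
  · subst h; decide
  · have hn : n = ((n.toNat : Nat) : Int) := by omega
    rw [hn, main4 n.toNat (by omega), alt_nat, decide_eq_decide]
    exact neighbor n.toNat (by omega)
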